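-- pv_equiv track=rewrite | github.com/jokh0108/study-algorithm | test/estsoft/1.py | solution
-- ===== SOURCE A (Python) =====
-- from collections import Counter
--
-- def solution(arr):
--     c = Counter(arr)
--     M = 0
--     M_key = 0
--     for k, v in c.items():
--         if M < v and k == v:
--             M = v
--             M_key = k
--     return M_key
-- ===== SOURCE B (Python) =====
-- def solution(arr):
--     best = 0
--     s = sorted(arr)
--     n = len(s)
--     i = 0
--     while i < n:
--         j = i
--         while j < n and s[j] == s[i]:
--             j += 1
--         if s[i] == j - i and best < s[i]:
--             best = s[i]
--         i = j
--     return best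
-- ===== Notes on version B (the rewrite author's own statement) =====
-- stated objective: alternative
-- what changed: B sorts the list and walks consecutive runs of equal values (run length = count), keeping the best k with run length == k, instead of building a Counter hash table and scanning its items.
import Mathlib
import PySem

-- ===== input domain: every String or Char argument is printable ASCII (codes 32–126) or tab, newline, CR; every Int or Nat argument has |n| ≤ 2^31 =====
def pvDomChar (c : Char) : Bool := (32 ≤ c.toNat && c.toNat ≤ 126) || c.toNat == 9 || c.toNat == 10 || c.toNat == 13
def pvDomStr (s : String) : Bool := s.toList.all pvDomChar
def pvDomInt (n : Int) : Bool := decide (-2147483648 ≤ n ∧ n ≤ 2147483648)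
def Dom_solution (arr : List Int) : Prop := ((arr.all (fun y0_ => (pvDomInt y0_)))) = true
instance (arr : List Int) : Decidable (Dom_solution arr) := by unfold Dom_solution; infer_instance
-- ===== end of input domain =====

-- B replaces A's Counter-and-scan by sort + run-length walk (alternative algorithm, same result).

-- ===== PORT A =====
def solution (arr : List Int) : Int :=
  let c := PySem.Dict.counter arr
  (c.items.foldl (fun (s : Int × Int) kv =>
      if s.1 < kv.2 ∧ kv.1 = kv.2 then (kv.2, kv.1) else s) ((0 : Int), (0 : Int))).2

-- ===== PORT B =====
-- the outer while: head x, inner while counts the leading run (takeWhile), s = s[run:] (dropWhile)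
def runScan (s : List Int) (best : Int) : Int :=
  match s with
  | [] => best
  | x :: rest =>
    let run : Int := (rest.takeWhile (fun y => y == x)).length + 1
    let best' := if x = run ∧ best < x then x else best
    runScan (rest.dropWhile (fun y => y == x)) best'
termination_by s.length
decreasing_by
  have := List.length_dropWhile_le (fun y => y == x) rest
  simpa using Nat.lt_succ_of_le this

def solution_alt (arr : List Int) : Int :=
  runScan (PySem.List.sorted arr (fun y => y) false) 0

-- ===== PRECONDITION & SPEC =====
def Spec_solution (arr : List Int) (out : Int) : Prop := out = solution_alt arr
instance (arr : List Int) (out : Int) : Decidable (Spec_solution arr out) := by unfold Spec_solution; infer_instance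

-- ===== CLAIM (what is proved, stated in full; the proofs are below) =====
def Claim_equal_solution : Prop := ∀ (arr : List Int), Dom_solution arr → Spec_solution arr (solution arr)

-- ===== LEMMAS AND PROOFS =====

-- A's scalar fold over a key list (after collapsing the (M, M_key) pair state)
def keyFold (arr l : List Int) (b : Int) : Int :=
  l.foldl (fun b k => if b < (arr.count k : Int) ∧ k = (arr.count k : Int) then k else b) b

lemma pairFold_eq (l : List (Int × Int)) (b : Int) :
    (l.foldl (fun (s : Int × Int) kv =>
      if s.1 < kv.2 ∧ kv.1 = kv.2 then (kv.2, kv.1) else s) (b, b)).2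
    = l.foldl (fun b kv => if b < kv.2 ∧ kv.1 = kv.2 then kv.1 else b) b := by
  induction l generalizing b with
  | nil => rfl
  | cons kv t ih =>
    simp only [List.foldl_cons]
    by_cases h : b < kv.2 ∧ kv.1 = kv.2
    · simp only [if_pos h]
      have : (kv.2, kv.1) = (kv.1, kv.1) := by rw [h.2]
      rw [this, ih]
    · simp only [if_neg h, ih]

lemma solution_eq (arr : List Int) :
    solution arr = keyFold arr (PySem.Set.ofList arr) 0 := by
  unfold solution keyFold
  rw [pairFold_eq, PySem.Dict.items_counter, List.foldl_map]

lemma le_keyFold (arr l : List Int) (b : Int) : b ≤ keyFold arr l b := by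
  induction l generalizing b with
  | nil => exact le_refl _
  | cons y t ih =>
    unfold keyFold at *
    simp only [List.foldl_cons]
    split_ifs with h
    · obtain ⟨h1, h2⟩ := h
      have hb : b ≤ y := by omega
      exact le_trans hb (ih _)
    · exact ih _

lemma keyFold_mem (arr l : List Int) (b : Int) :
    keyFold arr l b = b ∨
      (keyFold arr l b ∈ l ∧ keyFold arr l b = (arr.count (keyFold arr l b) : Int)) := by
  induction l generalizing b with
  | nil => exact Or.inl rfl
  | cons y t ih =>
    unfold keyFold at *
    simp only [List.foldl_cons]
    split_ifs with h
    · rcases ih y with h1 | h1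
      · exact Or.inr ⟨by simp [h1], by rw [h1]; exact h.2⟩
      · exact Or.inr ⟨List.mem_cons_of_mem _ h1.1, h1.2⟩
    · rcases ih b with h1 | h1
      · exact Or.inl h1
      · exact Or.inr ⟨List.mem_cons_of_mem _ h1.1, h1.2⟩

lemma keyFold_ge (arr l : List Int) (b : Int) :
    ∀ k ∈ l, k = (arr.count k : Int) → k ≤ keyFold arr l b := by
  induction l generalizing b with
  | nil => intro k hk; simp at hk
  | cons y t ih =>
    intro k hk hc
    unfold keyFold
    simp only [List.foldl_cons]
    rcases List.mem_cons.1 hk with rfl | hk'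
    · split_ifs with h
      · exact le_keyFold arr t k
      · have hnb : ¬ b < (arr.count k : Int) := fun hb => h ⟨hb, hc⟩
        have hbk : k ≤ b := by omega
        exact le_trans hbk (le_keyFold arr t b)
    · exact ih _ k hk' hc

-- run-structure facts about a sorted list
lemma takeWhile_head_run (x : Int) (rest : List Int)
    (hs : (x :: rest).Pairwise (fun a b => a ≤ b)) :
    ((x :: rest).count x = (rest.takeWhile (fun y => y == x)).length + 1)
    ∧ (∀ k, k ≠ x → (x :: rest).count k = (rest.dropWhile (fun y => y == x)).count k)
    ∧ (rest.dropWhile (fun y => y == x)).count x = 0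
    ∧ (rest.dropWhile (fun y => y == x)).Pairwise (fun a b => a ≤ b)
    ∧ (∀ k ∈ x :: rest, k = x ∨ k ∈ rest.dropWhile (fun y => y == x)) := by
  have hle : ∀ y ∈ rest, x ≤ y := (List.pairwise_cons.1 hs).1
  have hrest : rest.Pairwise (fun a b => a ≤ b) := (List.pairwise_cons.1 hs).2
  have hsplit : rest.takeWhile (fun y => y == x) ++ rest.dropWhile (fun y => y == x) = rest :=
    List.takeWhile_append_dropWhile
  have htw : ∀ y ∈ rest.takeWhile (fun y => y == x), y = x := by
    intro y hy
    simpa using List.mem_takeWhile_imp hy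
  have ht_sorted : (rest.dropWhile (fun y => y == x)).Pairwise (fun a b => a ≤ b) :=
    List.Pairwise.sublist (List.dropWhile_sublist _) hrest
  have ht_no_x : ∀ z ∈ rest.dropWhile (fun y => y == x), x < z := by
    intro z hz
    cases hd : rest.dropWhile (fun y => y == x) with
    | nil => rw [hd] at hz; simp at hz
    | cons y t' =>
      have hy_ne : ¬ ((y == x) = true) := by
        have := List.head_dropWhile_not (fun y => y == x) (l := rest) (by simp [hd])
        simpa [hd] using this
      have hy_ne' : y ≠ x := by simpa using hy_ne
      have hy_mem : y ∈ rest := by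
        have : y ∈ rest.dropWhile (fun y => y == x) := by simp [hd]
        exact (List.dropWhile_sublist _).mem this
      have hxy : x < y := lt_of_le_of_ne (hle y hy_mem) (Ne.symm hy_ne')
      rw [hd] at hz
      rcases List.mem_cons.1 hz with rfl | hz'
      · exact hxy
      · have : y ≤ z := by
          rw [hd] at ht_sorted
          exact (List.pairwise_cons.1 ht_sorted).1 z hz'
        omega
  have ht_cx : (rest.dropWhile (fun y => y == x)).count x = 0 := by
    rw [List.count_eq_zero]
    intro hmem
    exact absurd rfl (ne_of_gt (ht_no_x x hmem))
  refine ⟨?_, ?_, ht_cx, ht_sorted, ?_⟩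
  · have hca : rest.count x = (rest.takeWhile (fun y => y == x)).count x
        + (rest.dropWhile (fun y => y == x)).count x := by
      conv_lhs => rw [← hsplit]
      exact List.count_append ..
    have htwc : (rest.takeWhile (fun y => y == x)).count x
        = (rest.takeWhile (fun y => y == x)).length := by
      rw [List.count_eq_length]
      intro y hy; simpa using (htw y hy).symm
    simp only [List.count_cons_self]
    omega
  · intro k hk
    have hca : rest.count k = (rest.takeWhile (fun y => y == x)).count k
        + (rest.dropWhile (fun y => y == x)).count k := by
      conv_lhs => rw [← hsplit]
      exact List.count_append ..
    have htwc : (rest.takeWhile (fun y => y == x)).count k = 0 := by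
      rw [List.count_eq_zero]
      intro hmem
      exact hk (htw k hmem)
    have hcc : (x :: rest).count k = rest.count k := by
      simp [Ne.symm hk]
    omega
  · intro k hk
    rcases List.mem_cons.1 hk with rfl | hk'
    · exact Or.inl rfl
    · conv at hk' => rw [← hsplit]
      rcases List.mem_append.1 hk' with h1 | h1
      · exact Or.inl (htw k h1)
      · exact Or.inr h1

lemma runScan_cons (x : Int) (rest : List Int) (b : Int) :
    runScan (x :: rest) b =
      runScan (rest.dropWhile (fun y => y == x))
        (if x = ((rest.takeWhile (fun y => y == x)).length : Int) + 1 ∧ b < x then x else b) := by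
  rw [runScan]

lemma runScan_ge (s : List Int) (b : Int) : b ≤ runScan s b := by
  induction s, b using runScan.induct with
  | case1 b => simp [runScan]
  | case2 b x rest run best' ih =>
    rw [runScan]
    refine le_trans ?_ ih
    simp only [best']
    split_ifs with h
    · exact le_of_lt h.2
    · exact le_refl _

lemma runScan_mem_aux : ∀ (n : Nat) (s : List Int), s.length ≤ n → ∀ b : Int,
    s.Pairwise (fun a b => a ≤ b) →
    (runScan s b = b ∨ (runScan s b ∈ s ∧ runScan s b = (s.count (runScan s b) : Int))) := by
  intro n
  induction n with
  | zero =>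
    intro s hlen b _
    have hnil : s = [] := List.eq_nil_of_length_eq_zero (by omega)
    subst hnil
    exact Or.inl (by rw [runScan])
  | succ n ihn =>
    intro s hlen b hp
    match s with
    | [] => exact Or.inl (by rw [runScan])
    | x :: rest =>
      obtain ⟨hcx, hck, htcx, hts, hmem⟩ := takeWhile_head_run x rest hp
      rw [runScan_cons]
      have hxnot : x ∉ rest.dropWhile (fun y => y == x) := List.count_eq_zero.1 htcx
      have hlt : (rest.dropWhile (fun y => y == x)).length ≤ n := by
        have := List.length_dropWhile_le (fun y => y == x) rest
        simp only [List.length_cons] at hlen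
        omega
      set b' := (if x = ((rest.takeWhile (fun y => y == x)).length : Int) + 1 ∧ b < x
          then x else b) with hb'
      rcases ihn (rest.dropWhile (fun y => y == x)) hlt b' hts with h1 | h1
      · rw [h1, hb']
        split_ifs with h
        · refine Or.inr ⟨List.mem_cons_self .., ?_⟩
          rw [hcx]
          push_cast
          omega
        · exact Or.inl rfl
      · have hrx : runScan (rest.dropWhile (fun y => y == x)) b' ≠ x := by
          intro heq
          rw [heq] at h1
          exact hxnot h1.1
        have hsub : List.Sublist (rest.dropWhile (fun y => y == x)) rest :=
          List.dropWhile_sublist _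
        have hmemrest : runScan (rest.dropWhile (fun y => y == x)) b' ∈ rest :=
          hsub.mem h1.1
        refine Or.inr ⟨List.mem_cons_of_mem _ hmemrest, ?_⟩
        rw [hck _ hrx]
        exact h1.2

lemma runScan_le_aux : ∀ (n : Nat) (s : List Int), s.length ≤ n → ∀ b : Int,
    s.Pairwise (fun a b => a ≤ b) →
    ∀ k ∈ s, k = (s.count k : Int) → k ≤ runScan s b := by
  intro n
  induction n with
  | zero =>
    intro s hlen b _ k hk
    have hnil : s = [] := List.eq_nil_of_length_eq_zero (by omega)
    subst hnil
    simp at hk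
  | succ n ihn =>
    intro s hlen b hp k hk hc
    match s with
    | [] => simp at hk
    | x :: rest =>
      obtain ⟨hcx, hck, htcx, hts, hmem⟩ := takeWhile_head_run x rest hp
      rw [runScan_cons]
      have hxnot : x ∉ rest.dropWhile (fun y => y == x) := List.count_eq_zero.1 htcx
      have hlt : (rest.dropWhile (fun y => y == x)).length ≤ n := by
        have := List.length_dropWhile_le (fun y => y == x) rest
        simp only [List.length_cons] at hlen
        omega
      set b' := (if x = ((rest.takeWhile (fun y => y == x)).length : Int) + 1 ∧ b < x
          then x else b) with hb'
      rcases hmem k hk with rfl | hk'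
      · -- k is the head x; its run length is its full count
        have hrun : k = ((rest.takeWhile (fun y => y == k)).length : Int) + 1 := by
          rw [hcx] at hc; push_cast at hc; omega
        have hkb : k ≤ b' := by
          rw [hb']
          split_ifs with h
          · exact le_refl _
          · have : ¬ b < k := fun hb => h ⟨hrun, hb⟩
            omega
        exact le_trans hkb (runScan_ge _ _)
      · have hkx : k ≠ x := fun heq => hxnot (heq ▸ hk')
        exact ihn _ hlt b' hts k hk' (by rw [← hck k hkx]; exact hc)

-- ===== VERDICT (by name: the statement is the Claim_ definition above) =====
theorem solution_spec : Claim_equal_solution := by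
  intro arr _
  unfold Spec_solution solution_alt
  rw [solution_eq]
  set s := PySem.List.sorted arr (fun y => y) false with hsdef
  have hperm : s.Perm arr := PySem.List.sorted_perm ..
  have hs : s.Pairwise (fun a b => a ≤ b) := by
    simpa using PySem.List.sorted_pairwise (xs := arr) (key := fun y => y)
  have hcount : ∀ k : Int, s.count k = arr.count k := fun k => hperm.count_eq k
  have hmemS : ∀ k : Int, k ∈ s ↔ k ∈ arr := fun k => hperm.mem_iff
  apply le_antisymm
  · rcases keyFold_mem arr (PySem.Set.ofList arr) 0 with h | h
    · rw [h]
      exact runScan_ge s 0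
    · have hmem : keyFold arr (PySem.Set.ofList arr) 0 ∈ arr :=
        (PySem.Set.mem_ofList ..).1 h.1
      refine runScan_le_aux s.length s (le_refl _) 0 hs _ ((hmemS _).2 hmem) ?_
      rw [hcount]
      exact h.2
  · rcases runScan_mem_aux s.length s (le_refl _) 0 hs with h | h
    · rw [h]
      exact le_keyFold arr _ 0
    · have hmem : runScan s 0 ∈ PySem.Set.ofList arr :=
        (PySem.Set.mem_ofList ..).2 ((hmemS _).1 h.1)
      refine keyFold_ge arr _ 0 _ hmem ?_
      rw [← hcount]
      exact h.2
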